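-- pv_equiv track=rewrite | github.com/deetours/trekandstay | backend/services/whatsapp_safety.py | _check_keyword_repetition
-- ===== SOURCE A (Python) =====
-- def _check_keyword_repetition(text: str) -> bool:
--     """Check if keywords are repeated too much"""
--     words = text.lower().split()
--     if not words:
--         return False
--
--     # Count word frequencies
--     word_freq = {}
--     for word in words:
--         word_freq[word] = word_freq.get(word, 0) + 1
--
--     # Check if any word appears more than 3 times
--     return any(count > 3 for count in word_freq.values())
-- ===== SOURCE B (Python) =====
-- def _check_keyword_repetition(text: str) -> bool:
--     """Check if keywords are repeated too much"""
--     run = 0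
--     prev = None
--     for w in sorted(text.lower().split()):
--         if w == prev:
--             run += 1
--             if run > 3:
--                 return True
--         else:
--             prev = w
--             run = 1
--     return False
-- ===== Notes on version B (the rewrite author's own statement) =====
-- stated objective: alternative
-- what changed: Replaces the frequency dictionary with sort-then-scan: the word list is sorted so equal words are adjacent, and a single pass maintains a run counter, returning True as soon as a run exceeds 3.
import Mathlib
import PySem

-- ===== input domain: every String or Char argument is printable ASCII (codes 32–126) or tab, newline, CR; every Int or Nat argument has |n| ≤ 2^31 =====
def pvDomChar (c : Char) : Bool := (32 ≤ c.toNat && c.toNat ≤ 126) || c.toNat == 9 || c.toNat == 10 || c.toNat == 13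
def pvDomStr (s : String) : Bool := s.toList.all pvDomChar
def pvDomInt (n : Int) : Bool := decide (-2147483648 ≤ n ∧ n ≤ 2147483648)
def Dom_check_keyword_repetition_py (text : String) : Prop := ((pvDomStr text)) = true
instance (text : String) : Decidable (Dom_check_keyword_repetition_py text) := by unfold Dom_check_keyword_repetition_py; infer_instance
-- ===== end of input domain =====

-- B replaces A's frequency dictionary with sort-then-scan: sort the words, one pass with a run counter (alternative algorithm, same result).
-- ===== PORT A =====
def check_keyword_repetition_py (text : String) : Bool :=
  let words := PySem.Str.split₀ (PySem.Str.lower text)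
  if words = [] then false
  else
    let word_freq := words.foldl (fun d word => d.insert word (d.getD word 0 + 1))
      (PySem.Dict.empty : PySem.Dict String Int)
    word_freq.values.any (fun count => count > 3)

-- ===== PORT B =====
-- the 'for w in sorted(...)' loop with early return, as structural recursion over (prev, run)
def pvScanRuns : Option String → Int → List String → Bool
  | _, _, [] => false
  | prev, run, w :: rest =>
    if some w = prev then
      if run + 1 > 3 then true else pvScanRuns prev (run + 1) rest
    else pvScanRuns (some w) 1 rest

def check_keyword_repetition_py_alt (text : String) : Bool :=
  pvScanRuns none 0 (PySem.List.sorted (PySem.Str.split₀ (PySem.Str.lower text)) (fun x => x) false)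

-- ===== PRECONDITION & SPEC =====
def Spec_check_keyword_repetition_py (text : String) (out : Bool) : Prop := out = check_keyword_repetition_py_alt text
instance (text : String) (out : Bool) : Decidable (Spec_check_keyword_repetition_py text out) := by unfold Spec_check_keyword_repetition_py; infer_instance

-- ===== CLAIM (what is proved, stated in full; the proofs are below) =====
def Claim_equal_check_keyword_repetition_py : Prop := ∀ (text : String), Dom_check_keyword_repetition_py text → Spec_check_keyword_repetition_py text (check_keyword_repetition_py text)

-- ===== LEMMAS AND PROOFS =====

-- on a sorted tail whose elements all dominate the current word p, the scan fires iff
-- the pending run extends past 3 or some later word repeats more than 3 times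
lemma pvScanRuns_sorted (l : List String) (p : String) (r : Int)
    (hs : l.Pairwise (· ≤ ·)) (hlo : ∀ x ∈ l, p ≤ x) (hr : r ≤ 3) :
    pvScanRuns (some p) r l = true ↔
      (3 < r + (l.count p : Int)) ∨ ∃ w ∈ l, w ≠ p ∧ 3 < (l.count w : Int) := by
  induction l generalizing p r with
  | nil => simp [pvScanRuns]; omega
  | cons w rest ih =>
    rcases List.pairwise_cons.mp hs with ⟨hwle, hrest⟩
    by_cases hw : w = p
    · subst hw
      have hstep : pvScanRuns (some w) r (w :: rest)
          = if r + 1 > 3 then true else pvScanRuns (some w) (r + 1) rest := by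
        simp [pvScanRuns]
      rw [hstep]
      by_cases hgt : r + 1 > 3
      · rw [if_pos hgt]
        constructor
        · intro _; left; rw [List.count_cons_self]; push_cast; omega
        · intro _; rfl
      · rw [if_neg hgt, ih _ _ hrest hwle (by omega), List.count_cons_self]
        constructor
        · rintro (h | ⟨u, hu, hup, hcu⟩)
          · left; push_cast at h ⊢; omega
          · right
            exact ⟨u, List.mem_cons_of_mem _ hu, hup, by simpa [List.count_cons, Ne.symm hup] using hcu⟩
        · rintro (h | ⟨u, hu, hup, hcu⟩)
          · left; push_cast at h ⊢; omega
          · rcases List.mem_cons.mp hu with h1 | h1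
            · exact absurd h1 hup
            · right; exact ⟨u, h1, hup, by simpa [List.count_cons, Ne.symm hup] using hcu⟩
    · have hplt : p < w := lt_of_le_of_ne (hlo w (List.mem_cons_self)) (fun h => hw h.symm)
      have hpnot : ∀ x ∈ rest, p < x := fun x hx => lt_of_lt_of_le hplt (hwle x hx)
      have hcrestp : rest.count p = 0 :=
        List.count_eq_zero.mpr (fun hmem => lt_irrefl p (hpnot p hmem))
      have hstep : pvScanRuns (some p) r (w :: rest) = pvScanRuns (some w) 1 rest := by
        simp [pvScanRuns, hw]
      rw [hstep, ih _ _ hrest hwle (by omega)]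
      have hcountp : List.count p (w :: rest) = 0 := by
        simp [hw, hcrestp]
      rw [hcountp]
      constructor
      · rintro (h | ⟨u, hu, huw, hcu⟩)
        · right; refine ⟨w, List.mem_cons_self, fun h => hw h, ?_⟩
          rw [List.count_cons_self]; push_cast at h ⊢; omega
        · right
          have hup : u ≠ p := fun h => lt_irrefl p (h ▸ hpnot u hu)
          exact ⟨u, List.mem_cons_of_mem _ hu, hup, by simpa [List.count_cons, Ne.symm huw] using hcu⟩
      · rintro (h | ⟨u, hu, hup, hcu⟩)
        · push_cast at h; omega
        · rcases List.mem_cons.mp hu with h1 | h1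
          · subst h1
            left; rw [List.count_cons_self] at hcu; push_cast at hcu ⊢; omega
          · by_cases huw : u = w
            · subst huw
              left; rw [List.count_cons_self] at hcu; push_cast at hcu ⊢; omega
            · right; exact ⟨u, h1, huw, by simpa [List.count_cons, Ne.symm huw] using hcu⟩

lemma pvScanRuns_start (l : List String) (hs : l.Pairwise (· ≤ ·)) :
    pvScanRuns none 0 l = true ↔ ∃ w ∈ l, 3 < (l.count w : Int) := by
  cases l with
  | nil => simp [pvScanRuns]
  | cons w rest =>
    rcases List.pairwise_cons.mp hs with ⟨hwle, hrest⟩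
    have hstep : pvScanRuns none 0 (w :: rest) = pvScanRuns (some w) 1 rest := by
      simp [pvScanRuns]
    rw [hstep, pvScanRuns_sorted rest w 1 hrest hwle (by omega)]
    constructor
    · rintro (h | ⟨u, hu, huw, hcu⟩)
      · exact ⟨w, List.mem_cons_self, by rw [List.count_cons_self]; push_cast at h ⊢; omega⟩
      · exact ⟨u, List.mem_cons_of_mem _ hu, by simpa [List.count_cons, Ne.symm huw] using hcu⟩
    · rintro ⟨u, hu, hcu⟩
      by_cases huw : u = w
      · subst huw; left
        rw [List.count_cons_self] at hcu; push_cast at hcu ⊢; omega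
      · rcases List.mem_cons.mp hu with h1 | h1
        · exact absurd h1 huw
        · right; exact ⟨u, h1, huw, by simpa [List.count_cons, Ne.symm huw] using hcu⟩

-- ===== VERDICT (by name: the statement is the Claim_ definition above) =====
theorem check_keyword_repetition_py_spec : Claim_equal_check_keyword_repetition_py := by
  intro text _
  unfold Spec_check_keyword_repetition_py check_keyword_repetition_py check_keyword_repetition_py_alt
  set ws := PySem.Str.split₀ (PySem.Str.lower text) with hws
  have hperm : (PySem.List.sorted ws (fun x => x) false).Perm ws := PySem.List.sorted_perm ..
  have hsorted : (PySem.List.sorted ws (fun x => x) false).Pairwise (· ≤ ·) :=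
    PySem.List.sorted_pairwise ws (fun x => x)
  by_cases h : ws = []
  · rw [if_pos h, h]
    rfl
  · simp only [if_neg h, PySem.Dict.foldl_insert_getD_add_one_eq_counter,
      PySem.Dict.values, PySem.Dict.items_counter, List.map_map, List.any_map]
    rw [Bool.eq_iff_iff]
    simp only [List.any_eq_true, Function.comp_apply, decide_eq_true_eq, PySem.Set.mem_ofList,
      pvScanRuns_start _ hsorted]
    constructor
    · rintro ⟨u, hu, hcu⟩
      exact ⟨u, hperm.mem_iff.mpr hu, by rw [hperm.count_eq]; exact_mod_cast hcu⟩
    · rintro ⟨u, hu, hcu⟩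
      rw [hperm.count_eq] at hcu
      exact ⟨u, hperm.mem_iff.mp hu, by exact_mod_cast hcu⟩
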